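-- pv_equiv track=rewrite | github.com/Allagash/AdventOfCode2023 | day03/day03.py | getDigitLocns
-- ===== SOURCE A (Python) =====
-- surroundPos = [
--     (-1, -1), (-1, 0), (-1, 1),
--     (0, -1), (0, 1),
--     (1, -1), (1, 0), (1, 1)
--     ]
--
-- def getDigitLocns(symbolLocns, lines):
--     maxRow = len(lines) - 1
--     maxCol = len(lines[0]) - 1
--     digitsToScan = set()
--     for sym in symbolLocns:
--         for surround in surroundPos:
--             checkPos = (sym[0] + surround[0], sym[1] + surround[1])
--             if (checkPos[0] >= 0 and checkPos[0] <= maxRow and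
--                 checkPos[1] >=0 and checkPos[1] <= maxCol):
--                 checkChar = lines[checkPos[0]][checkPos[1]]
--                 if (checkChar.isdigit()):
--                     digitsToScan.add(checkPos)
--     return digitsToScan
-- ===== SOURCE B (Python) =====
-- surroundPos = [
--     (-1, -1), (-1, 0), (-1, 1),
--     (0, -1), (0, 1),
--     (1, -1), (1, 0), (1, 1)
--     ]
--
-- def getDigitLocns(symbolLocns, lines):
--     # Grid scan: walk every cell; a digit cell is collected when one of its
--     # 8 neighbours is a symbol position (membership in a prebuilt set).
--     symbols = set(symbolLocns)
--     width = len(lines[0])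
--     digitsToScan = set()
--     for row, line in enumerate(lines):
--         for col in range(min(len(line), width)):
--             if line[col].isdigit() and any((row + dr, col + dc) in symbols for dr, dc in surroundPos):
--                 digitsToScan.add((row, col))
--     return digitsToScan
-- ===== Notes on version B (the rewrite author's own statement) =====
-- stated objective: alternative
-- what changed: Inverts the traversal: instead of walking the 8 neighbours of each symbol, B scans every grid cell row-major and keeps a digit cell when one of its 8 neighbours lies in a prebuilt set of symbol positions.
import Mathlib
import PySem

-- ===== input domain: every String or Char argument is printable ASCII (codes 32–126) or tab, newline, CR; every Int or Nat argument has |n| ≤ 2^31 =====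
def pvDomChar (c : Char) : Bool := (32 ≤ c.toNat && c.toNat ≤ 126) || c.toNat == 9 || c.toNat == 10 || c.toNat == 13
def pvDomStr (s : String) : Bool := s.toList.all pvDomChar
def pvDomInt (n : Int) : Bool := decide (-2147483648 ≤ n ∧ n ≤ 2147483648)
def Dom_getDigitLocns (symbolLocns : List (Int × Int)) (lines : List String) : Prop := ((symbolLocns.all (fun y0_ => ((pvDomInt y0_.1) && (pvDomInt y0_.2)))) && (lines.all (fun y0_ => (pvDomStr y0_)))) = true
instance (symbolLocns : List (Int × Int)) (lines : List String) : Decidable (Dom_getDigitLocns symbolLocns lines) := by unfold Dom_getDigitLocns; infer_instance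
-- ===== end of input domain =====

-- B replaces A's symbol-centric traversal (8 neighbours of each symbol) by a row-major
-- grid scan that tests each digit cell's neighbours against a prebuilt symbol set
-- (objective: alternative decomposition, similar cost).
-- Both Pythons return a SET (iteration order unspecified, not modelled by PySem);
-- both ports therefore return the canonical sorted listing of that set.

-- ===== PORT A =====
def surroundPos : List (Int × Int) :=
  [(-1, -1), (-1, 0), (-1, 1), (0, -1), (0, 1), (1, -1), (1, 0), (1, 1)]

def getDigitLocns (symbolLocns : List (Int × Int)) (lines : List String) : List (Int × Int) :=
  let maxRow : Int := (lines.length : Int) - 1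
  let maxCol : Int := PySem.Str.len (PySem.List.pyGetD lines 0 "") - 1  -- lines[0]; lines ≠ [] under Pre_
  let digitsToScan : PySem.Set (Int × Int) :=
    symbolLocns.foldl (fun acc sym =>
      surroundPos.foldl (fun acc surround =>
        let checkPos : Int × Int := (sym.1 + surround.1, sym.2 + surround.2)
        if 0 ≤ checkPos.1 ∧ checkPos.1 ≤ maxRow ∧ 0 ≤ checkPos.2 ∧ checkPos.2 ≤ maxCol then
          match PySem.Str.pyGet? (PySem.List.pyGetD lines checkPos.1 "") checkPos.2 with
          | some checkChar => if PySem.Str.isdigit checkChar then PySem.Set.add acc checkPos else acc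
          | none => acc   -- IndexError in Python (ragged line); excluded by Pre_
        else acc) acc) PySem.Set.empty
  PySem.List.sorted digitsToScan (fun p => toLex p)

-- ===== PORT B =====
def getDigitLocns_alt (symbolLocns : List (Int × Int)) (lines : List String) : List (Int × Int) :=
  let symbols : PySem.Set (Int × Int) := PySem.Set.ofList symbolLocns
  let width : Int := PySem.Str.len (PySem.List.pyGetD lines 0 "")   -- lines[0]
  let digitsToScan : PySem.Set (Int × Int) :=
    (PySem.List.enumerate lines).foldl (fun acc rl =>
      (PySem.List.pyRange 0 (min (PySem.Str.len rl.2) width) 1).foldl (fun acc col =>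
        if ((PySem.Str.pyGet? rl.2 col).map PySem.Str.isdigit).getD false
            && surroundPos.any (fun d => PySem.Set.contains symbols (rl.1 + d.1, col + d.2)) then
          PySem.Set.add acc (rl.1, col)
        else acc) acc) PySem.Set.empty
  PySem.List.sorted digitsToScan (fun p => toLex p)

-- ===== PRECONDITION & SPEC =====
-- Pre_ excludes exactly the inputs where Python A raises: an empty lines list
-- (lines[0] → IndexError) and ragged grids where a cell A inspects (in range by
-- row count and by the width of line 0) lies past the end of its own line (IndexError).
def Pre_getDigitLocns (symbolLocns : List (Int × Int)) (lines : List String) : Prop :=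
  lines ≠ [] ∧ ∀ sym ∈ symbolLocns, ∀ dr ∈ ([-1, 0, 1] : List Int), ∀ dc ∈ ([-1, 0, 1] : List Int),
    (dr, dc) ≠ ((0 : Int), (0 : Int)) →
    0 ≤ sym.1 + dr → sym.1 + dr < (lines.length : Int) →
    0 ≤ sym.2 + dc → sym.2 + dc < PySem.Str.len (lines.getD 0 "") →
    sym.2 + dc < PySem.Str.len (lines.getD (sym.1 + dr).toNat "")
instance (symbolLocns : List (Int × Int)) (lines : List String) : Decidable (Pre_getDigitLocns symbolLocns lines) := by unfold Pre_getDigitLocns; infer_instance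

def pvWitness_getDigitLocns : (List (Int × Int)) × List String := ([(0, 0), (1, 2)], ["12*", ".3#"])

def Spec_getDigitLocns (symbolLocns : List (Int × Int)) (lines : List String) (out : List (Int × Int)) : Prop := out = getDigitLocns_alt symbolLocns lines
instance (symbolLocns : List (Int × Int)) (lines : List String) (out : List (Int × Int)) : Decidable (Spec_getDigitLocns symbolLocns lines out) := by unfold Spec_getDigitLocns; infer_instance

-- ===== CLAIM (what is proved, stated in full; the proofs are below) =====
def Claim_equal_getDigitLocns : Prop := ∀ (symbolLocns : List (Int × Int)) (lines : List String), Dom_getDigitLocns symbolLocns lines → Pre_getDigitLocns symbolLocns lines → Spec_getDigitLocns symbolLocns lines (getDigitLocns symbolLocns lines)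

-- ===== LEMMAS AND PROOFS =====

-- membership in a nested conditional-Set.add fold (covers both ports' loops)
theorem mem_foldl_addIf {β : Type} (P : β → Bool) (f : β → Int × Int) (l : List β)
    (acc : PySem.Set (Int × Int)) (x : Int × Int) :
    x ∈ l.foldl (fun a b => if P b then PySem.Set.add a (f b) else a) acc ↔
      x ∈ acc ∨ ∃ b ∈ l, P b ∧ x = f b := by
  induction l generalizing acc with
  | nil => simp
  | cons b l ih =>
    simp only [List.foldl_cons, ih, List.mem_cons]
    by_cases h : P b = true
    · simp only [h, if_true, PySem.Set.mem_add]
      constructor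
      · rintro ((hm | rfl) | ⟨b', hb', hp, rfl⟩)
        · exact Or.inl hm
        · exact Or.inr ⟨b, Or.inl rfl, h, rfl⟩
        · exact Or.inr ⟨b', Or.inr hb', hp, rfl⟩
      · rintro (hm | ⟨b', (rfl | hb'), hp, rfl⟩)
        · exact Or.inl (Or.inl hm)
        · exact Or.inl (Or.inr rfl)
        · exact Or.inr ⟨b', hb', hp, rfl⟩
    · simp only [h, Bool.false_eq_true, if_false]
      constructor
      · rintro (hm | ⟨b', hb', hp, rfl⟩)
        · exact Or.inl hm
        · exact Or.inr ⟨b', Or.inr hb', hp, rfl⟩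
      · rintro (hm | ⟨b', (rfl | hb'), hp, rfl⟩)
        · exact Or.inl hm
        · exact absurd hp h
        · exact Or.inr ⟨b', hb', hp, rfl⟩

theorem nodup_foldl_addIf {β : Type} (P : β → Bool) (f : β → Int × Int) (l : List β)
    (acc : PySem.Set (Int × Int)) (h : acc.Nodup) :
    (l.foldl (fun a b => if P b then PySem.Set.add a (f b) else a) acc).Nodup := by
  induction l generalizing acc with
  | nil => simpa
  | cons b l ih =>
    simp only [List.foldl_cons]
    apply ih
    split
    · exact PySem.Set.nodup_add acc (f b) h
    · exact h

theorem mem_foldl_nested {γ β : Type} (P : γ → β → Bool) (f : γ → β → Int × Int)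
    (g : γ → List β) (L : List γ) (acc : PySem.Set (Int × Int)) (x : Int × Int) :
    x ∈ L.foldl (fun a c => (g c).foldl (fun a b => if P c b then PySem.Set.add a (f c b) else a) a) acc ↔
      x ∈ acc ∨ ∃ c ∈ L, ∃ b ∈ g c, P c b ∧ x = f c b := by
  induction L generalizing acc with
  | nil => simp
  | cons c L ih =>
    simp only [List.foldl_cons, ih, mem_foldl_addIf, List.mem_cons]
    constructor
    · rintro ((h | ⟨b, hb, hp, rfl⟩) | ⟨c', hc', b, hb, hp, rfl⟩)
      · exact Or.inl h
      · exact Or.inr ⟨c, Or.inl rfl, b, hb, hp, rfl⟩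
      · exact Or.inr ⟨c', Or.inr hc', b, hb, hp, rfl⟩
    · rintro (h | ⟨c', (rfl | hc'), b, hb, hp, rfl⟩)
      · exact Or.inl (Or.inl h)
      · exact Or.inl (Or.inr ⟨b, hb, hp, rfl⟩)
      · exact Or.inr ⟨c', hc', b, hb, hp, rfl⟩

theorem nodup_foldl_nested {γ β : Type} (P : γ → β → Bool) (f : γ → β → Int × Int)
    (g : γ → List β) (L : List γ) (acc : PySem.Set (Int × Int)) (h : acc.Nodup) :
    (L.foldl (fun a c => (g c).foldl (fun a b => if P c b then PySem.Set.add a (f c b) else a) a) acc).Nodup := by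
  induction L generalizing acc with
  | nil => simpa
  | cons c L ih => exact ih _ (nodup_foldl_addIf _ _ _ _ h)

theorem mem_enumerate {α : Type} (xs : List α) (s : Int) (p : Int × α) :
    p ∈ PySem.List.enumerate xs s ↔ ∃ n : Nat, ∃ h : n < xs.length, p = (s + n, xs[n]) := by
  induction xs generalizing s with
  | nil => simp [PySem.List.enumerate_nil]
  | cons x xs ih =>
    simp only [PySem.List.enumerate_cons, List.mem_cons, ih]
    constructor
    · rintro (rfl | ⟨n, h, rfl⟩)
      · exact ⟨0, by simp, by simp⟩
      · refine ⟨n + 1, by simpa using h, ?_⟩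
        simp only [List.getElem_cons_succ]
        congr 1
        push_cast
        ring
    · rintro ⟨n, h, rfl⟩
      match n with
      | 0 => left; simp
      | n + 1 =>
        right
        refine ⟨n, by simpa using h, ?_⟩
        simp only [List.getElem_cons_succ]
        congr 1
        push_cast
        ring

-- the per-(symbol, offset) condition of A's loop, as a single Bool
def pvDigitAt (lines : List String) (r c : Int) : Bool :=
  ((PySem.Str.pyGet? (PySem.List.pyGetD lines r "") c).map PySem.Str.isdigit).getD false

def pvPA (maxRow maxCol : Int) (lines : List String) (sym d : Int × Int) : Bool :=
  decide (0 ≤ sym.1 + d.1 ∧ sym.1 + d.1 ≤ maxRow ∧ 0 ≤ sym.2 + d.2 ∧ sym.2 + d.2 ≤ maxCol)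
    && pvDigitAt lines (sym.1 + d.1) (sym.2 + d.2)

theorem bodyA_eq (maxRow maxCol : Int) (lines : List String) :
    (fun (acc : PySem.Set (Int × Int)) (sym : Int × Int) =>
      surroundPos.foldl (fun acc surround =>
        if 0 ≤ sym.1 + surround.1 ∧ sym.1 + surround.1 ≤ maxRow ∧
            0 ≤ sym.2 + surround.2 ∧ sym.2 + surround.2 ≤ maxCol then
          match PySem.Str.pyGet? (PySem.List.pyGetD lines (sym.1 + surround.1) "") (sym.2 + surround.2) with
          | some checkChar => if PySem.Str.isdigit checkChar then
              PySem.Set.add acc (sym.1 + surround.1, sym.2 + surround.2) else acc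
          | none => acc
        else acc) acc)
    = fun acc sym => surroundPos.foldl (fun a d =>
        if pvPA maxRow maxCol lines sym d then PySem.Set.add a (sym.1 + d.1, sym.2 + d.2) else a) acc := by
  funext acc sym
  congr 1
  funext a d
  by_cases hb : 0 ≤ sym.1 + d.1 ∧ sym.1 + d.1 ≤ maxRow ∧ 0 ≤ sym.2 + d.2 ∧ sym.2 + d.2 ≤ maxCol
  · rw [if_pos hb]
    cases hc : PySem.Str.pyGet? (PySem.List.pyGetD lines (sym.1 + d.1) "") (sym.2 + d.2) with
    | none => simp only [pvPA, pvDigitAt, hc]; simp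
    | some ch =>
      by_cases hd : PySem.Str.isdigit ch <;>
        · simp only [pvPA, pvDigitAt, hc]; simp [hb, hd]
  · rw [if_neg hb]
    simp [pvPA, hb]

theorem getDigitLocns_spec : Claim_equal_getDigitLocns := by
  intro syms lines hdom hpre
  unfold Spec_getDigitLocns
  simp only [getDigitLocns, getDigitLocns_alt]
  rw [bodyA_eq]
  apply PySem.List.sorted_eq_sorted_of_perm _ _ _ toLex.injective
  rw [List.perm_ext_iff_of_nodup
    (nodup_foldl_nested _ _ _ _ PySem.Set.empty (by simp [PySem.Set.empty]))
    (nodup_foldl_nested _ _ _ _ PySem.Set.empty (by simp [PySem.Set.empty]))]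
  intro x
  rw [mem_foldl_nested, mem_foldl_nested]
  have hempty : x ∈ (PySem.Set.empty : PySem.Set (Int × Int)) ↔ False := by
    simp [PySem.Set.empty]
  rw [hempty, false_or, false_or]
  obtain ⟨hne, hrag⟩ := hpre
  constructor
  · -- A's symbol-centric membership ⇒ B's grid-scan membership
    rintro ⟨sym, hsym, d, hd, hP, rfl⟩
    rw [pvPA, Bool.and_eq_true, decide_eq_true_eq] at hP
    obtain ⟨⟨h1, h2, h3, h4⟩, hdig⟩ := hP
    have hdmem : d.1 ∈ ([-1, 0, 1] : List Int) ∧ d.2 ∈ ([-1, 0, 1] : List Int) ∧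
        (d.1, d.2) ≠ ((0 : Int), (0 : Int)) ∧ ((-d.1, -d.2) : Int × Int) ∈ surroundPos := by
      simp only [surroundPos, List.mem_cons, List.not_mem_nil, or_false] at hd
      rcases hd with rfl | rfl | rfl | rfl | rfl | rfl | rfl | rfl <;> decide
    obtain ⟨hd1, hd2, hd0, hdneg⟩ := hdmem
    set n : Nat := (sym.1 + d.1).toNat with hn
    have hnlt : n < lines.length := by omega
    have hr : ((n : Nat) : Int) = sym.1 + d.1 := by omega
    have hline : lines.getD n "" = lines[n] := List.getD_eq_getElem lines "" hnlt
    have hcolr : sym.2 + d.2 < PySem.Str.len lines[n] := by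
      have := hrag sym hsym d.1 hd1 d.2 hd2 (by simpa using hd0) h1 (by omega) h3
        (by rw [PySem.List.pyGetD_zero] at h4; omega)
      rwa [← hn, hline] at this
    have hdig' : ((PySem.Str.pyGet? lines[n] (sym.2 + d.2)).map PySem.Str.isdigit).getD false = true := by
      rw [pvDigitAt] at hdig
      rw [← hr, PySem.List.pyGetD_natCast, hline] at hdig
      exact hdig
    refine ⟨(sym.1 + d.1, lines[n]), ?_, sym.2 + d.2, ?_, ?_, rfl⟩
    · rw [mem_enumerate]
      exact ⟨n, hnlt, by rw [Prod.ext_iff]; exact ⟨by omega, rfl⟩⟩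
    · rw [PySem.List.mem_pyRange_one]
      refine ⟨h3, lt_min hcolr ?_⟩
      rw [PySem.List.pyGetD_zero] at h4 ⊢
      omega
    · rw [Bool.and_eq_true]
      refine ⟨hdig', ?_⟩
      rw [List.any_eq_true]
      refine ⟨(-d.1, -d.2), hdneg, ?_⟩
      rw [PySem.Set.contains_iff, PySem.Set.mem_ofList]
      have : (sym.1 + d.1 + -d.1, sym.2 + d.2 + -d.2) = sym := by
        rw [Prod.ext_iff]; exact ⟨by ring, by ring⟩
      rw [this]
      exact hsym
  · -- B's grid-scan membership ⇒ A's symbol-centric membership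
    rintro ⟨rl, hrl, col, hcol, hP, rfl⟩
    rw [mem_enumerate] at hrl
    obtain ⟨n, hnlt, rfl⟩ := hrl
    rw [PySem.List.mem_pyRange_one] at hcol
    rw [Bool.and_eq_true] at hP
    obtain ⟨hdig, hany⟩ := hP
    rw [List.any_eq_true] at hany
    obtain ⟨d', hd', hcont⟩ := hany
    rw [PySem.Set.contains_iff, PySem.Set.mem_ofList] at hcont
    have hdneg : ((-d'.1, -d'.2) : Int × Int) ∈ surroundPos := by
      simp only [surroundPos, List.mem_cons, List.not_mem_nil, or_false] at hd'
      rcases hd' with rfl | rfl | rfl | rfl | rfl | rfl | rfl | rfl <;> decide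
    have hcolB : col < PySem.Str.len (PySem.List.pyGetD lines 0 "") := by
      have h := hcol.2
      rw [lt_min_iff] at h
      exact h.2
    refine ⟨((0 : Int) + n + d'.1, col + d'.2), hcont, (-d'.1, -d'.2), hdneg, ?_, ?_⟩
    · rw [pvPA, Bool.and_eq_true, decide_eq_true_eq]
      have e1 : (0 : Int) + n + d'.1 + -d'.1 = (n : Int) := by ring
      have e2 : col + d'.2 + -d'.2 = col := by ring
      constructor
      · simp only [e1, e2]
        refine ⟨by omega, by omega, hcol.1, by omega⟩
      · rw [pvDigitAt]
        simp only [e1, e2, PySem.List.pyGetD_natCast,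
          List.getD_eq_getElem lines "" hnlt]
        exact hdig
    · rw [Prod.ext_iff]
      exact ⟨by ring, by ring⟩
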